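-- pv_equiv track=rewrite | github.com/AnnaKilimova/Python-Basic-2 | HW_7.3.py | second_index
-- ===== SOURCE A (Python) =====
-- def second_index(text, some_str):
--
--     index = 0
--     sum = 0
--
--     for _ in text:
--         if text.find(some_str) != -1:
--             index += text.find(some_str)
--             text = text[text.find(some_str) + 1 :]
--             sum += 1
--
--             if sum == 2:
--                 return index + 1
-- ===== SOURCE B (Python) =====
-- def second_index(text, some_str):
--     m = len(some_str)
--     count = 0
--     for i in range(len(text)):
--         if text[i:i + m] == some_str:
--             count += 1
--             if count == 2:
--                 return i
--     return None
-- ===== Notes on version B (the rewrite author's own statement) =====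
-- stated objective: faster
-- what changed: A repeatedly calls text.find and re-slices (copies) the shrinking text while still looping once per character of the original string, so unmatched tails are rescanned over and over; B makes a single left-to-right scan over start positions with a running match count and returns at the second match.
import Mathlib
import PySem

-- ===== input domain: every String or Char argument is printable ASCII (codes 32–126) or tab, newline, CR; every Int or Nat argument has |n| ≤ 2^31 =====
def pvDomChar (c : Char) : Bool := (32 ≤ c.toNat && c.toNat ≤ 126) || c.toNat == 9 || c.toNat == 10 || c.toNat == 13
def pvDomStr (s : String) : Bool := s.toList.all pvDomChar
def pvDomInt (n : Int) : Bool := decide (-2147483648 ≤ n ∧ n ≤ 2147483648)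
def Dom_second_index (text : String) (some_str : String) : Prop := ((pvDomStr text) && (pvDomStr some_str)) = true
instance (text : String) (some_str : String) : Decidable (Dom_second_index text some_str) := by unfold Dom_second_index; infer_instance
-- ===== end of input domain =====

-- B makes one scan over candidate start positions with a running match count, instead of A's
-- repeated find-and-reslice of the text; same cost class, a genuinely different mechanism.

-- ===== PORT A =====
-- A's loop 'for _ in text' iterates over the ORIGINAL string (len(text) times) while the local
-- 'text' is re-sliced; ported as recursion on the original character list with state (index, sum, t).
def secondIndexGoA (p : List Char) (chars : List Char) (index : Int) (sum : Int)
    (t : List Char) : Option Int :=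
  match chars with
  | [] => none
  | _ :: rest =>
    if PySem.Chars.find t p ≠ -1 then
      let index' := index + PySem.Chars.find t p
      let t' := PySem.List.slice t (some (PySem.Chars.find t p + 1)) none
      let sum' := sum + 1
      if sum' = 2 then some (index' + 1) else secondIndexGoA p rest index' sum' t'
    else secondIndexGoA p rest index sum t

def second_index (text : String) (some_str : String) : Option Int :=
  secondIndexGoA some_str.toList text.toList 0 0 text.toList

-- ===== PORT B =====
-- B: for i in range(len(text)): if text[i:i+m] == some_str: count += 1; if count == 2: return i
def secondIndexGoB (s p : List Char) (m : Int) (idxs : List Int) (count : Int) : Option Int :=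
  match idxs with
  | [] => none
  | i :: rest =>
    if PySem.List.slice s (some i) (some (i + m)) = p then
      if count + 1 = 2 then some i else secondIndexGoB s p m rest (count + 1)
    else secondIndexGoB s p m rest count

def second_index_alt (text : String) (some_str : String) : Option Int :=
  secondIndexGoB text.toList some_str.toList (PySem.Str.len some_str)
    (PySem.List.pyRange 0 (PySem.Str.len text) 1) 0

-- ===== PRECONDITION & SPEC =====
def Spec_second_index (text : String) (some_str : String) (out : Option Int) : Prop := out = second_index_alt text some_str
instance (text : String) (some_str : String) (out : Option Int) : Decidable (Spec_second_index text some_str out) := by unfold Spec_second_index; infer_instance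

-- ===== CLAIM (what is proved, stated in full; the proofs are below) =====
def Claim_equal_second_index : Prop := ∀ (text : String) (some_str : String), Dom_second_index text some_str → Spec_second_index text some_str (second_index text some_str)

-- ===== LEMMAS AND PROOFS =====

-- A's loop is inert once find fails: the state never changes again, so it runs to the end and returns none.
lemma goA_none (p chars : List Char) (index sum : Int) (t : List Char)
    (h : PySem.Chars.find t p = -1) : secondIndexGoA p chars index sum t = none := by
  induction chars with
  | nil => rfl
  | cons c rest ih => simp [secondIndexGoA, h, ih]

lemma occ_isPrefixOf_false {p s : List Char} {j : Nat} (h : ¬ p <+: s.drop j) :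
    p.isPrefixOf (s.drop j) = false := by
  rw [← Bool.not_eq_true, List.isPrefixOf_iff_prefix]; exact h

-- B's scan over indices computes the (2-count)-th element of the filtered occurrence list.
lemma goB_filter (s p : List Char) (l : List Nat) (c : Int) (hc : c = 0 ∨ c = 1) :
    secondIndexGoB s p (↑p.length) (l.map fun j : Nat => (j : Int)) c
      = ((l.filter fun j => p.isPrefixOf (s.drop j))[(1 - c).toNat]?).map (fun j : Nat => (j : Int)) := by
  induction l generalizing c with
  | nil => simp [secondIndexGoB]
  | cons j rest ih =>
    have hcond : (PySem.List.slice s (some (↑j : Int)) (some ((↑j : Int) + (↑p.length : Int))) = p)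
        ↔ p <+: s.drop j := by
      rw [PySem.List.slice_natCast_add, List.prefix_iff_eq_take]
      constructor <;> (intro h; exact h.symm)
    by_cases hp : p <+: s.drop j
    · rcases hc with hc | hc <;> subst hc
      · simp only [List.map_cons, secondIndexGoB, if_pos (hcond.mpr hp)]
        rw [if_neg (by norm_num), show (0 : Int) + 1 = 1 from by norm_num, ih 1 (Or.inr rfl),
          List.filter_cons_of_pos (by rwa [List.isPrefixOf_iff_prefix])]
        norm_num
      · simp only [List.map_cons, secondIndexGoB, if_pos (hcond.mpr hp)]
        rw [if_pos (by norm_num),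
          List.filter_cons_of_pos (by rwa [List.isPrefixOf_iff_prefix])]
        norm_num
    · simp only [List.map_cons, secondIndexGoB, if_neg (fun h => hp (hcond.mp h))]
      rw [ih c hc, List.filter_cons_of_neg (by simp [occ_isPrefixOf_false hp])]

lemma alt_eq (text some_str : String) :
    second_index_alt text some_str
      = (((List.range' 0 text.toList.length).filter
            fun j => some_str.toList.isPrefixOf (text.toList.drop j))[1]?).map (fun j : Nat => (j : Int)) := by
  unfold second_index_alt
  rw [PySem.Str.len_eq, PySem.Str.len_eq, PySem.List.pyRange_zero_natCast,
    goB_filter _ _ _ _ (Or.inl rfl), ← List.range_eq_range']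
  norm_num

lemma filter_range'_nil (f : Nat → Bool) (a k : Nat)
    (h : ∀ i, a ≤ i → i < a + k → f i = false) : (List.range' a k).filter f = [] := by
  rw [List.filter_eq_nil_iff]
  intro i hi
  rw [List.mem_range'_1] at hi
  simp [h i hi.1 hi.2]

lemma filter_range'_first (f : Nat → Bool) (a k q : Nat) (ha : a ≤ q) (hq : q < a + k)
    (hfq : f q = true) (hmin : ∀ i, a ≤ i → i < q → f i = false) :
    (List.range' a k).filter f = q :: (List.range' (q + 1) (a + k - (q + 1))).filter f := by
  have hsplit : List.range' a k = List.range' a (q - a) ++ List.range' q (k - (q - a)) := by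
    have h1 := List.range'_append (s := a) (m := q - a) (n := k - (q - a)) (step := 1)
    rw [show a + 1 * (q - a) = q by omega, show q - a + (k - (q - a)) = k by omega] at h1
    exact h1.symm
  rw [hsplit, List.filter_append,
    filter_range'_nil f a (q - a) (fun i h1 h2 => hmin i h1 (by omega)),
    show k - (q - a) = (a + k - (q + 1)) + 1 by omega, List.range'_succ,
    List.filter_cons_of_pos hfq, List.nil_append]

lemma not_occ_of_find_neg (t p : List Char) (h : PySem.Chars.find t p = -1) (j : Nat) :
    ¬ p <+: t.drop j := by
  rw [PySem.Chars.find_eq_neg_one_iff] at h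
  exact fun hp => h (hp.isInfix.trans (List.drop_suffix j t).isInfix)

lemma find_spec (t p : List Char) (h : PySem.Chars.find t p ≠ -1) :
    0 ≤ PySem.Chars.find t p ∧ p <+: t.drop (PySem.Chars.find t p).toNat ∧
      ∀ i : Nat, i < (PySem.Chars.find t p).toNat → ¬ p <+: t.drop i := by
  have hs := PySem.Chars.findFrom_natCast_spec t p 0 (Nat.zero_le _)
  simp only [Nat.cast_zero, PySem.Chars.findFrom_zero] at hs
  obtain ⟨h1, h2, h3⟩ := hs h
  exact ⟨h1, h2, fun i hi => h3 i (Nat.zero_le _) hi⟩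

lemma occ_lt (s p : List Char) (P : Nat) (hocc : p <+: s.drop P)
    (hmin : ∀ i : Nat, i < P → ¬ p <+: s.drop i) (hn : 0 < s.length) : P < s.length := by
  by_contra hcon
  push Not at hcon
  have hp : p = [] := List.prefix_nil.mp (List.drop_eq_nil_of_le hcon ▸ hocc)
  exact hmin 0 (by omega) (by simp [hp])

lemma main_eq (s p : List Char) :
    secondIndexGoA p s 0 0 s
      = (((List.range' 0 s.length).filter fun j => p.isPrefixOf (s.drop j))[1]?).map
          (fun j : Nat => (j : Int)) := by
  cases s with
  | nil => simp [secondIndexGoA]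
  | cons c cs =>
    by_cases h1 : PySem.Chars.find (c :: cs) p = -1
    · rw [goA_none _ _ _ _ _ h1,
        filter_range'_nil _ 0 _ (fun i _ _ => occ_isPrefixOf_false (not_occ_of_find_neg _ _ h1 i))]
      rfl
    · obtain ⟨hge1, hocc1, hmin1⟩ := find_spec _ _ h1
      set q1 : Int := PySem.Chars.find (c :: cs) p with hq1def
      set P1 : Nat := q1.toNat with hP1def
      have hq1 : q1 = ↑P1 := (Int.toNat_of_nonneg hge1).symm
      have hP1lt : P1 < (c :: cs).length := occ_lt _ _ _ hocc1 hmin1 (by simp)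
      have hA1 : secondIndexGoA p (c :: cs) 0 0 (c :: cs)
          = secondIndexGoA p cs q1 1 ((c :: cs).drop (P1 + 1)) := by
        simp only [secondIndexGoA, if_neg (by norm_num : ¬(0 + 1 : Int) = 2)]
        rw [show q1 + 1 = ((P1 + 1 : Nat) : Int) by rw [hq1]; push_cast; ring,
          PySem.List.slice_from_natCast]
        norm_num
        rw [if_neg h1]
      set t1 : List Char := (c :: cs).drop (P1 + 1) with ht1def
      cases cs with
      | nil =>
        rw [hA1]
        have hnone : (List.filter (fun j => p.isPrefixOf (List.drop j [c]))
            (List.range' 0 [c].length))[1]? = none := by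
          apply List.getElem?_eq_none
          have hlen := List.length_filter_le (p := fun j => p.isPrefixOf (List.drop j [c]))
            (l := List.range' 0 [c].length)
          simp at hlen ⊢
          omega
        rw [hnone]
        rfl
      | cons c2 cs2 =>
        by_cases h2 : PySem.Chars.find t1 p = -1
        · rw [hA1, goA_none _ _ _ _ _ h2]
          rw [filter_range'_first _ 0 _ P1 (Nat.zero_le _) (by omega)
            (by rwa [List.isPrefixOf_iff_prefix])
            (fun i _ hi => occ_isPrefixOf_false (hmin1 i hi))]
          rw [filter_range'_nil _ (P1 + 1) _ (fun i hle hlt => by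
            have := not_occ_of_find_neg t1 p h2 (i - (P1 + 1))
            rw [ht1def, List.drop_drop, show P1 + 1 + (i - (P1 + 1)) = i by omega] at this
            exact occ_isPrefixOf_false this)]
          simp
        · obtain ⟨hge2, hocc2, hmin2⟩ := find_spec _ _ h2
          set q2 : Int := PySem.Chars.find t1 p with hq2def
          set P2' : Nat := q2.toNat with hP2'def
          have hq2 : q2 = ↑P2' := (Int.toNat_of_nonneg hge2).symm
          set P2 : Nat := P1 + 1 + P2' with hP2def
          have hocc2' : p <+: (c :: c2 :: cs2).drop P2 := by
            rw [ht1def, List.drop_drop] at hocc2; exact hocc2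
          have hmin2' : ∀ i : Nat, P1 + 1 ≤ i → i < P2 → ¬ p <+: (c :: c2 :: cs2).drop i := by
            intro i hle hlt
            have := hmin2 (i - (P1 + 1)) (by omega)
            rw [ht1def, List.drop_drop, show P1 + 1 + (i - (P1 + 1)) = i by omega] at this
            exact this
          have hP2lt : P2 < (c :: c2 :: cs2).length := by
            by_contra hcon
            push Not at hcon
            have hp : p = [] := List.prefix_nil.mp (List.drop_eq_nil_of_le hcon ▸ hocc2')
            have hP10 : P1 = 0 := by
              by_contra hne
              exact hmin1 0 (by omega) (by simp [hp])
            have hP20 : P2' = 0 := by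
              by_contra hne
              exact hmin2 0 (by omega) (by simp [hp])
            simp only [List.length_cons] at hcon
            omega
          have hA2 : secondIndexGoA p (c :: c2 :: cs2) 0 0 (c :: c2 :: cs2) = some (↑P2 : Int) := by
            rw [hA1]
            simp only [secondIndexGoA]
            rw [if_pos (show q2 ≠ -1 from h2), if_pos (by norm_num : (1 + 1 : Int) = 2)]
            have hfind2 : PySem.Chars.find t1 p = (P2' : Int) := by rw [← hq2def]; exact hq2
            rw [hq1, hfind2, hP2def]
            congr 1
            push_cast
            ring
          rw [hA2]
          rw [filter_range'_first _ 0 _ P1 (Nat.zero_le _) (by omega)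
            (by rwa [List.isPrefixOf_iff_prefix])
            (fun i _ hi => occ_isPrefixOf_false (hmin1 i hi))]
          rw [filter_range'_first _ (P1 + 1) _ P2 (by omega) (by simp at hP2lt ⊢; omega)
            (by rwa [List.isPrefixOf_iff_prefix])
            (fun i hle hlt => occ_isPrefixOf_false (hmin2' i hle hlt))]
          simp

-- ===== VERDICT (by name: the statement is the Claim_ definition above) =====
theorem second_index_spec : Claim_equal_second_index := by
  intro text some_str _
  unfold Spec_second_index second_index
  rw [alt_eq, main_eq]
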